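-- pv_equiv track=rewrite | github.com/Swishtos28/animation_nodes | base_types/socket.py | makeVariableName
-- ===== SOURCE A (Python) =====
-- def makeVariableName(name):
--     newName = ""
--     for i, char in enumerate(name):
--         if len(newName) == 0 and (char.isalpha() or char == "_"):
--             newName += char
--         elif len(newName) > 0 and (char.isalpha() or char.isnumeric() or char == "_"):
--             newName += char
--     return newName
-- ===== SOURCE B (Python) =====
-- def makeVariableName(name):
--     start = None
--     for i, char in enumerate(name):
--         if char.isalpha() or char == "_":
--             start = i
--             break
--     if start is None:
--         return ""
--     return "".join(c for c in name[start:]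
--                    if c.isalpha() or c.isnumeric() or c == "_")
-- ===== Notes on version B (the rewrite author's own statement) =====
-- stated objective: simpler
-- what changed: Replaced the single stateful loop that branches on whether the accumulator is still empty by a find-the-first-valid-start phase followed by a plain filter-and-join over the tail slice.
import Mathlib
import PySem

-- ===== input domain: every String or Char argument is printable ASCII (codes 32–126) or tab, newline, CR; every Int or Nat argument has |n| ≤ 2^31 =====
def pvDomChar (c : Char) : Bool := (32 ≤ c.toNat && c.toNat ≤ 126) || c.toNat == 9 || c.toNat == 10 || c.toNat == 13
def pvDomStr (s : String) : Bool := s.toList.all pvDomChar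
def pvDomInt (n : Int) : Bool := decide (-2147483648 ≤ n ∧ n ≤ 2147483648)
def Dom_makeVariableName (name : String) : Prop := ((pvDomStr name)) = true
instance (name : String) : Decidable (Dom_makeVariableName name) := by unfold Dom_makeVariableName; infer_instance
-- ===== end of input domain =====

-- B replaces A's single stateful loop (branching on whether the accumulator is empty) by a
-- find-the-first-valid-start phase followed by a plain filter over the tail: simpler decomposition.
-- On the ASCII domain 'char.isnumeric()' coincides with PySem.Chars.isdigit (exact there).

-- ===== PORT A =====
-- the character tests of A, exactly as written
def pvStartChar (c : Char) : Bool := PySem.Chars.isalpha c || c == '_'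
def pvBodyChar (c : Char) : Bool :=
  PySem.Chars.isalpha c || PySem.Chars.isdigit c || c == '_'

-- A's loop: state is newName (as its char list), branches in source order
def pvGoA : List Char → List Char → List Char
  | [], acc => acc
  | c :: cs, acc =>
      if acc.length == 0 && pvStartChar c then pvGoA cs (acc ++ [c])
      else if acc.length > 0 && pvBodyChar c then pvGoA cs (acc ++ [c])
      else pvGoA cs acc

def makeVariableName (name : String) : String := String.mk (pvGoA name.toList [])

-- ===== PORT B =====
-- Source B's first loop: scan for the index of the first valid start character (break = return)
def pvFindStart : List Char → Nat → Option Nat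
  | [], _ => none
  | c :: cs, i => if pvStartChar c then some i else pvFindStart cs (i + 1)

def makeVariableName_alt (name : String) : String :=
  match pvFindStart name.toList 0 with
  | none => ""
  | some j => String.mk (((name.toList).drop j).filter pvBodyChar)

-- ===== PRECONDITION & SPEC =====
def Spec_makeVariableName (name : String) (out : String) : Prop := out = makeVariableName_alt name
instance (name : String) (out : String) : Decidable (Spec_makeVariableName name out) := by unfold Spec_makeVariableName; infer_instance

-- ===== CLAIM (what is proved, stated in full; the proofs are below) =====
def Claim_equal_makeVariableName : Prop := ∀ (name : String), Dom_makeVariableName name → Spec_makeVariableName name (makeVariableName name)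

-- ===== LEMMAS AND PROOFS =====

lemma pvBody_of_start {c : Char} (h : pvStartChar c = true) : pvBodyChar c = true := by
  simp only [pvStartChar, pvBodyChar, Bool.or_eq_true] at *
  rcases h with h | h
  · exact Or.inl (Or.inl h)
  · exact Or.inr h

lemma pvGoA_nonempty (cs : List Char) : ∀ acc, acc ≠ [] →
    pvGoA cs acc = acc ++ cs.filter pvBodyChar := by
  induction cs with
  | nil => intro acc _; simp [pvGoA]
  | cons c cs ih =>
    intro acc hacc
    have hlen : acc.length > 0 := List.length_pos_iff.mpr hacc
    by_cases hb : pvBodyChar c = true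
    · simp [pvGoA, Nat.pos_iff_ne_zero.mp hlen, hlen, hb,
        ih (acc ++ [c]) (by simp)]
    · simp [pvGoA, Nat.pos_iff_ne_zero.mp hlen, hlen, hb, ih acc hacc]

lemma pvFindStart_shift (cs : List Char) : ∀ i,
    pvFindStart cs (i + 1) = (pvFindStart cs i).map (· + 1) := by
  induction cs with
  | nil => intro i; simp [pvFindStart]
  | cons c cs ih =>
    intro i
    by_cases hc : pvStartChar c = true
    · simp [pvFindStart, hc]
    · simp [pvFindStart, hc, ih]

lemma pvGoA_eq (cs : List Char) :
    pvGoA cs [] = (match pvFindStart cs 0 with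
      | none => []
      | some j => (cs.drop j).filter pvBodyChar) := by
  induction cs with
  | nil => simp [pvGoA, pvFindStart]
  | cons c cs ih =>
    by_cases hc : pvStartChar c = true
    · have hb := pvBody_of_start hc
      simp [pvGoA, pvFindStart, hc, hb, pvGoA_nonempty cs [c] (by simp)]
    · rw [show pvGoA (c :: cs) [] = pvGoA cs [] by simp [pvGoA, hc]]
      rw [ih]
      rw [show pvFindStart (c :: cs) 0 = (pvFindStart cs 0).map (· + 1) by
        simp [pvFindStart, hc, pvFindStart_shift]]
      cases pvFindStart cs 0 with
      | none => simp
      | some j => simp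

-- ===== VERDICT (by name: the statement is the Claim_ definition above) =====
theorem makeVariableName_spec : Claim_equal_makeVariableName := by
  intro name _
  unfold Spec_makeVariableName makeVariableName makeVariableName_alt
  rw [pvGoA_eq]
  cases pvFindStart name.toList 0 with
  | none => rfl
  | some j => rfl
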